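-- pv_equiv track=rewrite | github.com/SylvainDe/aoc | python/2016/day7.py | support_ssl
-- ===== SOURCE A (Python) =====
-- def support_ssl(ip):
--     is_in_bracket = False
--     abas, babs = set(), set()
--     for a, b, c in zip(ip, ip[1:], ip[2:]):
--         if a == "[":
--             is_in_bracket = True
--         elif a == "]":
--             is_in_bracket = False
--         elif a != b and a == c and b not in "[]":
--             if is_in_bracket:
--                 babs.add(b + a)
--             else:
--                 abas.add(a + b)
--     return len(set.intersection(abas, babs)) > 0
-- ===== SOURCE B (Python) =====
-- def support_ssl(ip):
--     # Phase 1: split ip into bracket-free segments, each tagged with whether it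
--     # lies inside brackets (flag = last bracket seen before the segment).
--     segments = []
--     cur = []
--     in_br = False
--     for ch in ip:
--         if ch == '[' or ch == ']':
--             segments.append((''.join(cur), in_br))
--             cur = []
--             in_br = (ch == '[')
--         else:
--             cur.append(ch)
--     segments.append((''.join(cur), in_br))
--     # Phase 2: scan each segment's 3-char windows.
--     abas, babs = set(), set()
--     for seg, hyper in segments:
--         for a, b, c in zip(seg, seg[1:], seg[2:]):
--             if a != b and a == c:
--                 if hyper:
--                     babs.add(b + a)
--                 else:
--                     abas.add(a + b)
--     return len(abas & babs) > 0
-- ===== Notes on version B (the rewrite author's own statement) =====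
-- stated objective: alternative
-- what changed: Replaces A's single-pass bracket state machine over 3-char windows of the whole string by a two-phase decomposition: first split the address into bracket-free segments tagged supernet/hypernet, then scan each segment's windows separately.
import Mathlib
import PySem

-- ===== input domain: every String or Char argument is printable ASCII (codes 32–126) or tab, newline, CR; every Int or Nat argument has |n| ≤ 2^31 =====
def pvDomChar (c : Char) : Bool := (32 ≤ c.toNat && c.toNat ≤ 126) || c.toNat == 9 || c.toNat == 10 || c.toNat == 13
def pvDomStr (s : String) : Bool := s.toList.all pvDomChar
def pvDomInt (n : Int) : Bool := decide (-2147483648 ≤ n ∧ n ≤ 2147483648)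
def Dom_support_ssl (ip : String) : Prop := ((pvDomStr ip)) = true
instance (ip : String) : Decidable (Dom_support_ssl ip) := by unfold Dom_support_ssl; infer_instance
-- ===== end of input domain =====

-- B replaces A's single-pass bracket state machine by a two-phase decomposition
-- (split into bracket-free segments first, then scan each segment's windows);
-- objective: alternative decomposition, same cost, return value proved equal.

-- ===== PORT A =====
-- zip(ip, ip[1:], ip[2:]) as a list of (a, (b, c)) triples (both Pythons use this window zip)
def pvWindows (l : List Char) : List (Char × Char × Char) :=
  l.zip ((l.drop 1).zip (l.drop 2))

-- the body of A's for-loop; state = (is_in_bracket, abas, babs); b + a = String.mk [b, a]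
def pvStepA (st : Bool × PySem.Set String × PySem.Set String) (abc : Char × Char × Char) :
    Bool × PySem.Set String × PySem.Set String :=
  if abc.1 = '[' then (true, st.2.1, st.2.2)
  else if abc.1 = ']' then (false, st.2.1, st.2.2)
  else if abc.1 ≠ abc.2.1 ∧ abc.1 = abc.2.2 ∧ ¬(abc.2.1 = '[' ∨ abc.2.1 = ']') then
    (if st.1 then (st.1, st.2.1, PySem.Set.add st.2.2 (String.mk [abc.2.1, abc.1]))
     else (st.1, PySem.Set.add st.2.1 (String.mk [abc.1, abc.2.1]), st.2.2))
  else st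

def support_ssl (ip : String) : Bool :=
  let st := (pvWindows ip.toList).foldl pvStepA (false, PySem.Set.empty, PySem.Set.empty)
  decide (0 < PySem.Set.len (PySem.Set.inter st.2.1 st.2.2))

-- ===== PORT B =====
-- phase 1 loop body: state = (segments so far, current segment chars, in_br)
-- (segments keep List Char where the Python joins to a str; scanning a joined str's
-- chars is exactly scanning the char list, so this is the same computation)
def pvSplitStep (st : List (List Char × Bool) × List Char × Bool) (ch : Char) :
    List (List Char × Bool) × List Char × Bool :=
  if ch = '[' ∨ ch = ']' then (st.1 ++ [(st.2.1, st.2.2)], [], decide (ch = '['))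
  else (st.1, st.2.1 ++ [ch], st.2.2)

-- phase 2 inner loop body (windows of one segment; hyper = segment's flag)
def pvScanStep (hyper : Bool) (ps : PySem.Set String × PySem.Set String)
    (abc : Char × Char × Char) : PySem.Set String × PySem.Set String :=
  if abc.1 ≠ abc.2.1 ∧ abc.1 = abc.2.2 then
    (if hyper then (ps.1, PySem.Set.add ps.2 (String.mk [abc.2.1, abc.1]))
     else (PySem.Set.add ps.1 (String.mk [abc.1, abc.2.1]), ps.2))
  else ps

-- phase 2 outer loop body: scan one (segment, hyper) pair
def pvScanSeg (ps : PySem.Set String × PySem.Set String) (sh : List Char × Bool) :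
    PySem.Set String × PySem.Set String :=
  (pvWindows sh.1).foldl (pvScanStep sh.2) ps

def support_ssl_alt (ip : String) : Bool :=
  let sp := ip.toList.foldl pvSplitStep ([], [], false)
  let segments := sp.1 ++ [(sp.2.1, sp.2.2)]
  let sets := segments.foldl pvScanSeg (PySem.Set.empty, PySem.Set.empty)
  decide (0 < PySem.Set.len (PySem.Set.inter sets.1 sets.2))

-- ===== PRECONDITION & SPEC =====
def Spec_support_ssl (ip : String) (out : Bool) : Prop := out = support_ssl_alt ip
instance (ip : String) (out : Bool) : Decidable (Spec_support_ssl ip out) := by unfold Spec_support_ssl; infer_instance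

-- ===== CLAIM (what is proved, stated in full; the proofs are below) =====
def Claim_equal_support_ssl : Prop := ∀ (ip : String), Dom_support_ssl ip → Spec_support_ssl ip (support_ssl ip)

-- ===== LEMMAS AND PROOFS =====

-- "ch is not a bracket"
def pvNB (ch : Char) : Bool := !(ch = '[' || ch = ']')

-- the common reference machine: A's loop written as structural recursion
def pvWin (inb : Bool) (p : PySem.Set String × PySem.Set String) (a b c : Char) :
    PySem.Set String × PySem.Set String :=
  if a ≠ b ∧ a = c ∧ ¬(b = '[' ∨ b = ']') then
    (if inb then (p.1, PySem.Set.add p.2 (String.mk [b, a]))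
     else (PySem.Set.add p.1 (String.mk [a, b]), p.2))
  else p

def pvProcR (inb : Bool) (p : PySem.Set String × PySem.Set String) :
    List Char → PySem.Set String × PySem.Set String
  | [] => p
  | a :: t =>
    if a = '[' then pvProcR true p t
    else if a = ']' then pvProcR false p t
    else match t with
      | b :: c :: _ => pvProcR inb (pvWin inb p a b c) t
      | _ => p

-- the recursive form of B's splitter
def pvSplitR (inb : Bool) (cur : List Char) : List Char → List (List Char × Bool)
  | [] => [(cur, inb)]
  | ch :: t =>
    if ch = '[' ∨ ch = ']' then (cur, inb) :: pvSplitR (decide (ch = '[')) [] t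
    else pvSplitR inb (cur ++ [ch]) t

lemma pvWindows_cons3 (a b c : Char) (t : List Char) :
    pvWindows (a :: b :: c :: t) = (a, b, c) :: pvWindows (b :: c :: t) := rfl

lemma procR_nil (inb : Bool) (p : PySem.Set String × PySem.Set String) :
    pvProcR inb p [] = p := rfl

lemma procR_cons3 (inb : Bool) (p : PySem.Set String × PySem.Set String) (a b c : Char)
    (r : List Char) :
    pvProcR inb p (a :: b :: c :: r) =
      if a = '[' then pvProcR true p (b :: c :: r)
      else if a = ']' then pvProcR false p (b :: c :: r)
      else pvProcR inb (pvWin inb p a b c) (b :: c :: r) := rfl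

lemma procR_one (inb : Bool) (p : PySem.Set String × PySem.Set String) (a : Char) :
    pvProcR inb p [a] = p := by
  show (if a = '[' then pvProcR true p [] else if a = ']' then pvProcR false p [] else p) = p
  split_ifs <;> rfl

lemma procR_two (inb : Bool) (p : PySem.Set String × PySem.Set String) (a b : Char) :
    pvProcR inb p [a, b] = p := by
  show (if a = '[' then pvProcR true p [b] else if a = ']' then pvProcR false p [b] else p) = p
  split_ifs <;> simp [procR_one]

lemma procR_br (inb : Bool) (p : PySem.Set String × PySem.Set String) (br : Char)
    (t : List Char) (h : br = '[' ∨ br = ']') :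
    pvProcR inb p (br :: t) = pvProcR (decide (br = '[')) p t := by
  rcases h with h | h <;> subst h
  · show (if ('[':Char) = '[' then pvProcR true p t else _) = _
    rw [if_pos rfl]
    simp
  · show (if (']':Char) = '[' then _ else if (']':Char) = ']' then pvProcR false p t else _) = _
    rw [if_neg (by decide), if_pos rfl]
    simp

lemma pvNB_true (a : Char) (h : pvNB a = true) : ¬ a = '[' ∧ ¬ a = ']' := by
  simpa [pvNB] using h

lemma pvNB_false (a : Char) (h : pvNB a = false) : a = '[' ∨ a = ']' := by
  by_cases h1 : a = '['
  · exact Or.inl h1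
  · by_cases h2 : a = ']'
    · exact Or.inr h2
    · exfalso; simp [pvNB, h1, h2] at h

-- A's fold equals the reference machine (second component = the two sets)
lemma foldA_eq : ∀ (l : List Char) (inb : Bool) (p : PySem.Set String × PySem.Set String),
    ((pvWindows l).foldl pvStepA (inb, p)).2 = pvProcR inb p l := by
  intro l
  induction l with
  | nil => intro inb p; rfl
  | cons a t ih =>
    intro inb p
    match t with
    | [] =>
      show p = pvProcR inb p [a]
      rw [procR_one]
    | [b] =>
      show p = pvProcR inb p [a, b]
      rw [procR_two]
    | b :: c :: r =>
      rw [pvWindows_cons3, List.foldl_cons, procR_cons3]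
      by_cases ha1 : a = '['
      · have hs : pvStepA (inb, p) (a, b, c) = (true, p) := by simp [pvStepA, ha1]
        rw [hs, if_pos ha1]; exact ih true p
      · by_cases ha2 : a = ']'
        · have hs : pvStepA (inb, p) (a, b, c) = (false, p) := by simp [pvStepA, ha1, ha2]
          rw [hs, if_neg ha1, if_pos ha2]; exact ih false p
        · have hs : pvStepA (inb, p) (a, b, c) = (inb, pvWin inb p a b c) := by
            simp only [pvStepA, pvWin, if_neg ha1, if_neg ha2]
            split_ifs <;> rfl
          rw [hs, if_neg ha1, if_neg ha2]; exact ih inb _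

-- B's splitter fold equals the recursive splitter
lemma split_fold : ∀ (l : List Char) (segs : List (List Char × Bool)) (cur : List Char) (inb : Bool),
    (l.foldl pvSplitStep (segs, cur, inb)).1 ++
        [((l.foldl pvSplitStep (segs, cur, inb)).2.1, (l.foldl pvSplitStep (segs, cur, inb)).2.2)] =
      segs ++ pvSplitR inb cur l := by
  intro l
  induction l with
  | nil => intro segs cur inb; simp [pvSplitR]
  | cons ch t ih =>
    intro segs cur inb
    simp only [List.foldl_cons, pvSplitStep, pvSplitR]
    by_cases hb : ch = '[' ∨ ch = ']'
    · simp only [if_pos hb]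
      rw [ih]
      simp
    · simp only [if_neg hb]
      exact ih segs (cur ++ [ch]) inb

-- the recursive splitter, unfolded one maximal bracket-free run at a time
lemma splitR_span : ∀ (l : List Char) (inb : Bool) (cur : List Char),
    pvSplitR inb cur l =
      (cur ++ l.takeWhile pvNB, inb) ::
        (match l.dropWhile pvNB with
         | [] => []
         | br :: t => pvSplitR (decide (br = '[')) [] t) := by
  intro l
  induction l with
  | nil => intro inb cur; simp [pvSplitR]
  | cons ch t ih =>
    intro inb cur
    by_cases hb : ch = '[' ∨ ch = ']'
    · have hnb : pvNB ch = false := by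
        rcases hb with h | h <;> simp [pvNB, h]
      simp only [pvSplitR, if_pos hb, List.takeWhile_cons, hnb, List.dropWhile_cons,
        Bool.false_eq_true, reduceIte, List.append_nil]
    · have hnb : pvNB ch = true := by
        push_neg at hb; simp [pvNB, hb.1, hb.2]
      simp only [pvSplitR, if_neg hb, List.takeWhile_cons, hnb, List.dropWhile_cons, reduceIte]
      rw [ih inb (cur ++ [ch])]
      simp

-- scanning one bracket-free run with B's window step advances the machine exactly,
-- provided the run is maximal (what follows is empty or starts with a bracket)
lemma scan_run : ∀ (seg rest : List Char) (inb : Bool) (p : PySem.Set String × PySem.Set String),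
    (∀ x ∈ seg, pvNB x = true) →
    (rest = [] ∨ ∃ br t, rest = br :: t ∧ pvNB br = false) →
    pvProcR inb p (seg ++ rest) = pvProcR inb ((pvWindows seg).foldl (pvScanStep inb) p) rest := by
  intro seg
  induction seg with
  | nil => intro rest inb p _ _; simp [pvWindows]
  | cons a s ih =>
    intro rest inb p hseg hrest
    have hna := pvNB_true a (hseg a (by simp))
    match s with
    | b :: c :: r =>
      have hnb := pvNB_true b (hseg b (by simp))
      rw [pvWindows_cons3, List.foldl_cons]
      have h1 : pvProcR inb p ((a :: b :: c :: r) ++ rest) =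
          pvProcR inb (pvWin inb p a b c) ((b :: c :: r) ++ rest) := by
        simp only [List.cons_append]
        rw [procR_cons3, if_neg hna.1, if_neg hna.2]
      have hwin : pvWin inb p a b c = pvScanStep inb p (a, b, c) := by
        simp [pvWin, pvScanStep, hnb.1, hnb.2]
      rw [h1, hwin]
      exact ih rest inb _ (fun x hx => hseg x (by simp [hx])) hrest
    | [b] =>
      have hnb := pvNB_true b (hseg b (by simp))
      have hw : pvWindows [a, b] = [] := rfl
      rw [hw, List.foldl_nil]
      rcases hrest with hre | ⟨br, t, hre, hbr⟩
      · subst hre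
        simp only [List.append_nil]
        rw [procR_two, procR_nil]
      · subst hre
        have hbrb := pvNB_false br hbr
        have hbrne : ¬ a = br := by
          intro h
          rcases hbrb with h2 | h2 <;> rw [h, h2] at hna
          · exact hna.1 rfl
          · exact hna.2 rfl
        have step1 : pvProcR inb p ([a, b] ++ br :: t) =
            pvProcR inb (pvWin inb p a b br) ([b] ++ br :: t) := by
          simp only [List.cons_append, List.nil_append]
          rw [procR_cons3, if_neg hna.1, if_neg hna.2]
        have hwinnop : pvWin inb p a b br = p := by
          simp [pvWin, hbrne]
        rw [step1, hwinnop]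
        have h2 := ih (br :: t) inb p (fun y hy => hseg y (by simp at hy; simp [hy]))
          (Or.inr ⟨br, t, rfl, hbr⟩)
        simpa using h2
    | [] =>
      have hw : pvWindows [a] = [] := rfl
      rw [hw, List.foldl_nil]
      rcases hrest with hre | ⟨br, t, hre, hbr⟩
      · subst hre
        simp only [List.append_nil]
        rw [procR_one, procR_nil]
      · subst hre
        have hbrb := pvNB_false br hbr
        have hbrne : ¬ a = br := by
          intro h
          rcases hbrb with h2 | h2 <;> rw [h, h2] at hna
          · exact hna.1 rfl
          · exact hna.2 rfl
        match t with
        | [] =>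
          simp only [List.singleton_append]
          rw [procR_two, procR_one]
        | c :: t' =>
          simp only [List.singleton_append]
          rw [procR_cons3, if_neg hna.1, if_neg hna.2]
          have : pvWin inb p a br c = p := by
            rcases hbrb with h | h <;> simp [pvWin, h]
          rw [this]

-- folding B's phase-2 scan over the recursive splitter equals the reference machine
lemma scan_splitR : ∀ (n : Nat) (l : List Char), l.length ≤ n →
    ∀ (inb : Bool) (p : PySem.Set String × PySem.Set String),
      (pvSplitR inb [] l).foldl pvScanSeg p = pvProcR inb p l := by
  intro n
  induction n with
  | zero =>
    intro l hl inb p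
    have : l = [] := List.length_eq_zero_iff.mp (Nat.le_zero.mp hl)
    subst this
    simp [pvSplitR, pvScanSeg, pvWindows, procR_nil]
  | succ m ih =>
    intro l hl inb p
    rw [splitR_span]
    have hseg : ∀ x ∈ l.takeWhile pvNB, pvNB x = true := fun x hx => List.mem_takeWhile_imp hx
    have hdecomp : l.takeWhile pvNB ++ l.dropWhile pvNB = l := List.takeWhile_append_dropWhile
    match hdw : l.dropWhile pvNB with
    | [] =>
      simp only [List.foldl_cons, List.foldl_nil, pvScanSeg, List.nil_append]
      conv_rhs => rw [← hdecomp, hdw]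
      rw [scan_run _ [] inb p hseg (Or.inl rfl)]
      simp [procR_nil]
    | br :: t =>
      have hne : l.dropWhile pvNB ≠ [] := by rw [hdw]; simp
      have hbr : pvNB br = false := by
        have h0 := List.head_dropWhile_not pvNB (l := l) hne
        have h1 : (l.dropWhile pvNB).head hne = br := by
          rw [List.head_eq_iff_head?_eq_some, hdw]; rfl
        rw [h1] at h0
        simpa using h0
      have hlen : t.length ≤ m := by
        have h1 : (l.dropWhile pvNB).length ≤ l.length := List.length_dropWhile_le _ _
        rw [hdw] at h1
        simp at h1
        omega
      simp only [List.foldl_cons, List.nil_append]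
      rw [ih t hlen (decide (br = '[')) (pvScanSeg p (l.takeWhile pvNB, inb))]
      conv_rhs => rw [← hdecomp, hdw]
      rw [scan_run _ (br :: t) inb p hseg (Or.inr ⟨br, t, rfl, hbr⟩)]
      rw [procR_br _ _ _ _ (pvNB_false br hbr)]
      rfl

-- ===== VERDICT (by name: the statement is the Claim_ definition above) =====
theorem support_ssl_spec : Claim_equal_support_ssl := by
  intro ip _
  show support_ssl ip = support_ssl_alt ip
  unfold support_ssl support_ssl_alt
  have key : ((pvWindows ip.toList).foldl pvStepA (false, PySem.Set.empty, PySem.Set.empty)).2 =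
      ((ip.toList.foldl pvSplitStep ([], [], false)).1 ++
          [((ip.toList.foldl pvSplitStep ([], [], false)).2.1,
            (ip.toList.foldl pvSplitStep ([], [], false)).2.2)]).foldl pvScanSeg
        (PySem.Set.empty, PySem.Set.empty) := by
    rw [foldA_eq, split_fold, List.nil_append,
      scan_splitR ip.toList.length ip.toList le_rfl]
  simp only []
  rw [key]
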